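-- pv_equiv track=rewrite | github.com/Anastasia-Starshinova/GamesGames | app.py | check_count_players
-- ===== SOURCE A (Python) =====
-- def check_count_players(data):
--     new_dict = {}
--     for i in range(len(data)):
--         if data[i].isdigit():
--             new_dict[i] = data[i]
--     if len(new_dict) >= 5 or len(new_dict) == 0:
--         return [0, data]
--     else:
--         if len(new_dict) == 1:
--             count = [new_dict.get(key) for key in new_dict][0]
--             return [1, count]
--         elif len(new_dict) == 2:
--             count = [key for key in new_dict]
--             if int(count[0]) + 1 == int(count[1]):
--                 return [1, new_dict[count[0]] + new_dict[count[1]]]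
--             else:
--                 return [1, new_dict[count[0]] + '-' + new_dict[count[1]]]
--         elif len(new_dict) == 3:
--             count = [key for key in new_dict]
--             if int(count[0]) + 1 == int(count[1]):
--                 return [0, data]
--             else:
--                 first_digit = new_dict[count[0]]
--                 if int(count[1]) + 1 != int(count[2]):
--                     return [0, data]
--                 elif int(count[1]) + 1 == int(count[2]):
--                     second_digit = new_dict[count[1]] + new_dict[count[2]]
--                     return [1, first_digit + '-' + second_digit]
--         elif len(new_dict) == 4:
--             count = [key for key in new_dict]
--             if int(count[0]) + 1 != int(count[1]):
--                 return [0, data]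
--             elif int(count[0]) + 1 == int(count[1]):
--                 first_digit = new_dict[count[0]] + new_dict[count[1]]
--                 if int(count[2]) + 1 != int(count[3]):
--                     return [0, data]
--                 elif int(count[2]) + 1 == int(count[3]):
--                     second_digit = new_dict[count[2]] + new_dict[count[3]]
--                     return [1, first_digit + '-' + second_digit]
-- ===== SOURCE B (Python) =====
-- def check_count_players(data):
--     # One pass: collect maximal runs of consecutive digit characters, then
--     # classify the run-shape instead of dispatching on digit count with
--     # pairwise index arithmetic.
--     runs = []
--     cur = ''
--     for ch in data:
--         if ch.isdigit():
--             cur += ch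
--         else:
--             if cur:
--                 runs.append(cur)
--                 cur = ''
--     if cur:
--         runs.append(cur)
--     if len(runs) == 1:
--         r = runs[0]
--         if len(r) == 1 or len(r) == 2:
--             return [1, r]
--         if len(r) == 4:
--             return [1, r[:2] + '-' + r[2:]]
--     elif len(runs) == 2 and len(runs[0]) <= len(runs[1]) <= 2:
--         return [1, runs[0] + '-' + runs[1]]
--     return [0, data]
-- ===== Notes on version B (the rewrite author's own statement) =====
-- stated objective: simpler
-- what changed: Instead of collecting digit positions into a dict and dispatching on the digit count with pairwise index arithmetic and repeated dict lookups, B makes one pass that builds the maximal runs of consecutive digit characters and then classifies the run shape: one run of length 1, 2 or 4, or two runs of lengths (1,1), (1,2) or (2,2), are accepted and joined with a dash (a single length-4 run is split into its two halves); everything else returns [0, data].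
import Mathlib
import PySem

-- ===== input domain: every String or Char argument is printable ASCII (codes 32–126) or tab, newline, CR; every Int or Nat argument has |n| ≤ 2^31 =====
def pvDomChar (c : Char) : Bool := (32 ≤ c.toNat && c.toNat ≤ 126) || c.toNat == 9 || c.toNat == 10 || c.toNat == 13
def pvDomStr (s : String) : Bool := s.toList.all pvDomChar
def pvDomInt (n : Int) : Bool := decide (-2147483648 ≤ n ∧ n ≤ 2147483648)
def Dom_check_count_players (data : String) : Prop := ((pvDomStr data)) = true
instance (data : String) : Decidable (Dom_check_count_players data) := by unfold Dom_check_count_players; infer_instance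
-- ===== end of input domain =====

-- B replaces A's position-dictionary plus pairwise index arithmetic by one pass building
-- maximal digit runs and a short classification of the run shape (objective: simpler).

-- ===== PORT A =====
-- A's dict new_dict: keys are positions (Int), values the 1-char strings data[i] (List Char).
def check_count_players (data : String) : Int × String :=
  let nd : PySem.Dict Int (List Char) :=
    (PySem.List.pyRange 0 (PySem.Str.len data) 1).foldl (fun d i =>
      match PySem.Str.pyGet? data i with
      | some c => if PySem.Chars.strIsdigit [c] then d.insert i [c] else d
      | none => d) PySem.Dict.empty
  if 5 ≤ nd.size ∨ nd.size = 0 then (0, data)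
  else if nd.size = 1 then
    (1, String.ofList (PySem.List.pyGetD (nd.keys.map (fun k => (nd.get? k).getD [])) 0 []))
  else if nd.size = 2 then
    let count := nd.keys
    let k0 := PySem.List.pyGetD count 0 0
    let k1 := PySem.List.pyGetD count 1 0
    if k0 + 1 = k1 then
      (1, String.ofList (nd.getD k0 [] ++ nd.getD k1 []))
    else
      (1, String.ofList (nd.getD k0 [] ++ ['-'] ++ nd.getD k1 []))
  else if nd.size = 3 then
    let count := nd.keys
    let k0 := PySem.List.pyGetD count 0 0
    let k1 := PySem.List.pyGetD count 1 0
    let k2 := PySem.List.pyGetD count 2 0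
    if k0 + 1 = k1 then (0, data)
    else
      let first_digit := nd.getD k0 []
      if k1 + 1 ≠ k2 then (0, data)
      else
        let second_digit := nd.getD k1 [] ++ nd.getD k2 []
        (1, String.ofList (first_digit ++ ['-'] ++ second_digit))
  else if nd.size = 4 then
    let count := nd.keys
    let k0 := PySem.List.pyGetD count 0 0
    let k1 := PySem.List.pyGetD count 1 0
    let k2 := PySem.List.pyGetD count 2 0
    let k3 := PySem.List.pyGetD count 3 0
    if k0 + 1 ≠ k1 then (0, data)
    else
      let first_digit := nd.getD k0 [] ++ nd.getD k1 []
      if k2 + 1 ≠ k3 then (0, data)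
      else
        let second_digit := nd.getD k2 [] ++ nd.getD k3 []
        (1, String.ofList (first_digit ++ ['-'] ++ second_digit))
  else (0, data)  -- unreachable: nd.size is one of 0..4 here

-- ===== PORT B =====
def check_count_players_alt (data : String) : Int × String :=
  -- one pass: (runs so far, current digit run)
  let st := data.toList.foldl
    (fun (st : List (List Char) × List Char) ch =>
      if PySem.Chars.isdigit ch then (st.1, st.2 ++ [ch])
      else if st.2 ≠ [] then (st.1 ++ [st.2], ([] : List Char)) else st)
    ([], [])
  let runs := if st.2 ≠ [] then st.1 ++ [st.2] else st.1
  match runs with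
  | [r] =>
    if r.length = 1 ∨ r.length = 2 then (1, String.ofList r)
    else if r.length = 4 then (1, String.ofList (r.take 2 ++ '-' :: r.drop 2))
    else (0, data)
  | [r1, r2] =>
    if r1.length ≤ r2.length ∧ r2.length ≤ 2 then (1, String.ofList (r1 ++ '-' :: r2))
    else (0, data)
  | _ => (0, data)

-- ===== PRECONDITION & SPEC =====
def Spec_check_count_players (data : String) (out : Int × String) : Prop := out = check_count_players_alt data
instance (data : String) (out : Int × String) : Decidable (Spec_check_count_players data out) := by unfold Spec_check_count_players; infer_instance

-- ===== CLAIM (what is proved, stated in full; the proofs are below) =====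
def Claim_equal_check_count_players : Prop := ∀ (data : String), Dom_check_count_players data → Spec_check_count_players data (check_count_players data)

-- ===== LEMMAS AND PROOFS =====

-- digit positions of the suffix that starts at index n, with their 1-char values
def pvPos (n : Int) : List Char → List (Int × List Char)
  | [] => []
  | c :: t => if PySem.Chars.isdigit c then (n, [c]) :: pvPos (n + 1) t else pvPos (n + 1) t

-- grouping of an (increasing-index) position list into maximal adjacent runs
def pvGaux (i : Int) (acc : List (List Char)) (cur : List Char) : List (Int × List Char) → List (List Char)
  | [] => acc ++ [cur]
  | (j, v) :: t => if j = i + 1 then pvGaux j acc (cur ++ v) t else pvGaux j (acc ++ [cur]) v t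

def pvGroups : List (Int × List Char) → List (List Char)
  | [] => []
  | (j, v) :: t => pvGaux j [] v t

theorem pvPos_lb (n : Int) (l : List Char) : ∀ p ∈ pvPos n l, n ≤ p.1 := by
  induction l generalizing n with
  | nil => simp [pvPos]
  | cons c t ih =>
    intro p hp
    simp only [pvPos] at hp
    split at hp
    · rcases List.mem_cons.1 hp with h | h
      · simp [h]
      · have := ih (n + 1) p h; omega
    · have := ih (n + 1) p hp; omega

theorem pvPos_pairwise (n : Int) (l : List Char) : (pvPos n l).Pairwise (fun p q => p.1 < q.1) := by
  induction l generalizing n with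
  | nil => simp [pvPos]
  | cons c t ih =>
    simp only [pvPos]
    split
    · exact List.Pairwise.cons (fun q hq => by have := pvPos_lb (n + 1) t q hq; simp; omega) (ih (n + 1))
    · exact ih (n + 1)

theorem pvGaux_acc (i : Int) (a b : List (List Char)) (cur : List Char) (t : List (Int × List Char)) :
    pvGaux i (a ++ b) cur t = a ++ pvGaux i b cur t := by
  induction t generalizing i b cur with
  | nil => simp [pvGaux]
  | cons p t ih =>
    obtain ⟨j, v⟩ := p
    simp only [pvGaux]
    split
    · exact ih j b (cur ++ v)
    · rw [List.append_assoc]; exact ih j (b ++ [cur]) v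

theorem pvGaux_notadj (i : Int) (acc : List (List Char)) (cur : List Char)
    (t : List (Int × List Char)) (h : ∀ p ∈ t, p.1 ≠ i + 1) :
    pvGaux i acc cur t = (acc ++ [cur]) ++ pvGroups t := by
  cases t with
  | nil => simp [pvGaux, pvGroups]
  | cons p t =>
    obtain ⟨j, v⟩ := p
    have hj : j ≠ i + 1 := h (j, v) (by simp)
    simp only [pvGaux, pvGroups, if_neg hj]
    have := pvGaux_acc j (acc ++ [cur]) [] v t
    simpa using this

-- ===== A-side characterization =====

def pvStep (d : PySem.Dict Int (List Char)) (p : Int × Char) : PySem.Dict Int (List Char) :=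
  if PySem.Chars.isdigit p.2 then d.insert p.1 [p.2] else d

theorem pvFoldA (l : List Char) (n : Int) (d : PySem.Dict Int (List Char))
    (hk : ∀ k ∈ d.keys, k < n) :
    ((PySem.List.enumerate l n).foldl pvStep d).items = d.items ++ pvPos n l := by
  induction l generalizing n d with
  | nil => simp [PySem.List.enumerate_nil, pvPos]
  | cons c t ih =>
    rw [PySem.List.enumerate_cons]
    simp only [List.foldl_cons, pvPos, pvStep]
    split
    · rw [ih (n + 1) (d.insert n [c]) ?_]
      · rw [PySem.Dict.items_insert_of_not_contains]
        · simp
        · rw [← Bool.not_eq_true, PySem.Dict.contains_iff_mem_keys]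
          intro hmem; have := hk n hmem; omega
      · intro k hkmem
        rcases (PySem.Dict.mem_keys_insert _ _ _ _).1 hkmem with h | h
        · omega
        · have := hk k h; omega
    · rw [ih (n + 1) d (fun k hkm => by have := hk k hkm; omega)]

-- ===== B-side characterization =====

def pvBStep (st : List (List Char) × List Char) (ch : Char) : List (List Char) × List Char :=
  if PySem.Chars.isdigit ch then (st.1, st.2 ++ [ch])
  else if st.2 ≠ [] then (st.1 ++ [st.2], ([] : List Char)) else st

def pvFlush (st : List (List Char) × List Char) : List (List Char) :=
  if st.2 ≠ [] then st.1 ++ [st.2] else st.1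

theorem pvFoldB (l : List Char) (n : Int) :
    (∀ (acc : List (List Char)) (cur : List Char), cur ≠ [] →
        pvFlush (l.foldl pvBStep (acc, cur)) = pvGaux (n - 1) acc cur (pvPos n l)) ∧
    (∀ acc : List (List Char),
        pvFlush (l.foldl pvBStep (acc, [])) = acc ++ pvGroups (pvPos n l)) := by
  induction l generalizing n with
  | nil =>
    constructor
    · intro acc cur hcur; simp [pvFlush, pvPos, pvGaux, hcur]
    · intro acc; simp [pvFlush, pvPos, pvGroups]
  | cons c t ih =>
    constructor
    · intro acc cur hcur
      simp only [List.foldl_cons, pvPos]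
      by_cases hd : PySem.Chars.isdigit c
      · rw [if_pos hd]
        have step : pvBStep (acc, cur) c = (acc, cur ++ [c]) := by simp [pvBStep, hd]
        rw [step]
        rw [(ih (n + 1)).1 acc (cur ++ [c]) (by simp)]
        simp [pvGaux]
      · rw [if_neg hd]
        have step : pvBStep (acc, cur) c = (acc ++ [cur], []) := by simp [pvBStep, hd, hcur]
        rw [step, (ih (n + 1)).2 (acc ++ [cur])]
        rw [pvGaux_notadj (n - 1) acc cur (pvPos (n + 1) t)
          (fun p hp => by have := pvPos_lb (n + 1) t p hp; omega)]
    · intro acc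
      simp only [List.foldl_cons, pvPos]
      by_cases hd : PySem.Chars.isdigit c
      · rw [if_pos hd]
        have step : pvBStep (acc, []) c = (acc, [c]) := by simp [pvBStep, hd]
        rw [step, (ih (n + 1)).1 acc [c] (by simp)]
        simp only [pvGroups]
        have := pvGaux_acc n acc [] [c] (pvPos (n + 1) t)
        simp at this
        rw [← this]
        congr 1
        omega
      · rw [if_neg hd]
        have step : pvBStep (acc, []) c = (acc, []) := by simp [pvBStep, hd]
        rw [step, (ih (n + 1)).2 acc]

-- sum of run lengths = number of positions (all values are singletons)
theorem pvGaux_len (i : Int) (acc : List (List Char)) (cur : List Char) (t : List (Int × List Char))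
    (hv : ∀ p ∈ t, (p.2 : List Char).length = 1) :
    ((pvGaux i acc cur t).map List.length).sum
      = (acc.map List.length).sum + cur.length + t.length := by
  induction t generalizing i acc cur with
  | nil => simp [pvGaux]
  | cons p t ih =>
    obtain ⟨j, v⟩ := p
    have hvlen : v.length = 1 := hv (j, v) (by simp)
    simp only [pvGaux]
    split
    · rw [ih j acc (cur ++ v) (fun q hq => hv q (by simp [hq]))]
      simp [hvlen]; omega
    · rw [ih j (acc ++ [cur]) v (fun q hq => hv q (by simp [hq]))]
      simp [hvlen]; omega

theorem pvGroups_len (t : List (Int × List Char))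
    (hv : ∀ p ∈ t, (p.2 : List Char).length = 1) :
    ((pvGroups t).map List.length).sum = t.length := by
  cases t with
  | nil => simp [pvGroups]
  | cons p t =>
    obtain ⟨j, v⟩ := p
    have := pvGaux_len j [] v t (fun q hq => hv q (by simp [hq]))
    simp only [pvGroups]
    rw [this]
    have hv1 : v.length = 1 := hv (j, v) (by simp)
    simp [hv1]; omega

theorem pvPos_sing (n : Int) (l : List Char) : ∀ p ∈ pvPos n l, (p.2 : List Char).length = 1 := by
  induction l generalizing n with
  | nil => simp [pvPos]
  | cons c t ih =>
    intro p hp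
    simp only [pvPos] at hp
    split at hp
    · rcases List.mem_cons.1 hp with h | h
      · simp [h]
      · exact ih (n + 1) p h
    · exact ih (n + 1) p hp

theorem pvStrIsdigit_singleton (c : Char) :
    PySem.Chars.strIsdigit [c] = PySem.Chars.isdigit c := by
  simp [PySem.Chars.strIsdigit]

-- A's classification body, abstracted over the finished dict (defeq to A's body)
def pvAclass (data : String) (nd : PySem.Dict Int (List Char)) : Int × String :=
  if 5 ≤ nd.size ∨ nd.size = 0 then (0, data)
  else if nd.size = 1 then
    (1, String.ofList (PySem.List.pyGetD (nd.keys.map (fun k => (nd.get? k).getD [])) 0 []))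
  else if nd.size = 2 then
    let count := nd.keys
    let k0 := PySem.List.pyGetD count 0 0
    let k1 := PySem.List.pyGetD count 1 0
    if k0 + 1 = k1 then
      (1, String.ofList (nd.getD k0 [] ++ nd.getD k1 []))
    else
      (1, String.ofList (nd.getD k0 [] ++ ['-'] ++ nd.getD k1 []))
  else if nd.size = 3 then
    let count := nd.keys
    let k0 := PySem.List.pyGetD count 0 0
    let k1 := PySem.List.pyGetD count 1 0
    let k2 := PySem.List.pyGetD count 2 0
    if k0 + 1 = k1 then (0, data)
    else
      let first_digit := nd.getD k0 []
      if k1 + 1 ≠ k2 then (0, data)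
      else
        let second_digit := nd.getD k1 [] ++ nd.getD k2 []
        (1, String.ofList (first_digit ++ ['-'] ++ second_digit))
  else if nd.size = 4 then
    let count := nd.keys
    let k0 := PySem.List.pyGetD count 0 0
    let k1 := PySem.List.pyGetD count 1 0
    let k2 := PySem.List.pyGetD count 2 0
    let k3 := PySem.List.pyGetD count 3 0
    if k0 + 1 ≠ k1 then (0, data)
    else
      let first_digit := nd.getD k0 [] ++ nd.getD k1 []
      if k2 + 1 ≠ k3 then (0, data)
      else
        let second_digit := nd.getD k2 [] ++ nd.getD k3 []
        (1, String.ofList (first_digit ++ ['-'] ++ second_digit))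
  else (0, data)

-- B's classification body, abstracted over the finished run list (defeq to B's match)
def pvBclass (data : String) (runs : List (List Char)) : Int × String :=
  match runs with
  | [r] =>
    if r.length = 1 ∨ r.length = 2 then (1, String.ofList r)
    else if r.length = 4 then (1, String.ofList (r.take 2 ++ '-' :: r.drop 2))
    else (0, data)
  | [r1, r2] =>
    if r1.length ≤ r2.length ∧ r2.length ≤ 2 then (1, String.ofList (r1 ++ '-' :: r2))
    else (0, data)
  | _ => (0, data)

theorem pvA_eq (data : String) :
    check_count_players data = pvAclass data (PySem.Dict.mk (pvPos 0 data.toList)) := by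
  have h1 : check_count_players data
      = pvAclass data ((PySem.List.pyRange 0 (PySem.Str.len data) 1).foldl (fun d i =>
          match PySem.Str.pyGet? data i with
          | some c => if PySem.Chars.strIsdigit [c] then d.insert i [c] else d
          | none => d) PySem.Dict.empty) := rfl
  rw [h1]
  congr 1
  have h2 : (PySem.List.pyRange 0 (PySem.Str.len data) 1).foldl (fun d i =>
        match PySem.Str.pyGet? data i with
        | some c => if PySem.Chars.strIsdigit [c] then d.insert i [c] else d
        | none => d) PySem.Dict.empty
      = (PySem.List.enumerate data.toList 0).foldl pvStep PySem.Dict.empty := by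
    rw [PySem.List.enumerate_eq_map_pyRange (d := ' '), List.foldl_map]
    have hlen : PySem.Str.len data = PySem.List.len data.toList := rfl
    rw [hlen]
    apply PySem.List.foldl_congr_mem
    intro d i hi
    rw [PySem.List.len_eq] at hi
    have hi' := (PySem.List.mem_pyRange_one).1 hi
    have hget : PySem.Str.pyGet? data i = some (data.toList[i.toNat]) := by
      simp only [PySem.Str.pyGet?_eq]
      exact PySem.List.pyGet?_eq_some_getElem data.toList hi'.1 (by simpa using hi'.2)
    have hgetD : PySem.List.pyGetD data.toList i ' ' = data.toList[i.toNat] :=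
      PySem.List.pyGetD_eq_getElem data.toList ' ' hi'.1 (by simpa using hi'.2)
    rw [hget]
    simp only [pvStep, hgetD, pvStrIsdigit_singleton]
  rw [h2]
  apply PySem.Dict.ext
  rw [pvFoldA data.toList 0 PySem.Dict.empty (by simp)]
  simp [PySem.Dict.empty]

theorem pvB_eq (data : String) :
    check_count_players_alt data = pvBclass data (pvGroups (pvPos 0 data.toList)) := by
  have h1 : check_count_players_alt data
      = pvBclass data (pvFlush (data.toList.foldl pvBStep ([], []))) := rfl
  rw [h1, (pvFoldB data.toList 0).2 []]
  simp

theorem pvMain (data : String) (P : List (Int × List Char))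
    (hpw : P.Pairwise (fun p q => p.1 < q.1))
    (hsing : ∀ p ∈ P, (p.2 : List Char).length = 1) :
    pvAclass data (PySem.Dict.mk P) = pvBclass data (pvGroups P) := by
  rcases P with _ | ⟨⟨i, a⟩, P⟩
  · simp [pvGroups, pvAclass, pvBclass, PySem.Dict.size]
  rcases P with _ | ⟨⟨j, b⟩, P⟩
  · -- one digit
    obtain ⟨x, rfl⟩ := List.length_eq_one_iff.1 (hsing (i, a) (by simp))
    simp only [pvGroups, pvGaux, pvAclass, pvBclass, PySem.Dict.size, PySem.Dict.keys,
      PySem.Dict.getD_eq_get?_getD, PySem.Dict.get?_mk_cons, PySem.List.pyGetD_ofNat']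
    simp [List.getD]
  rcases P with _ | ⟨⟨k, c2⟩, P⟩
  · -- two digits
    obtain ⟨x, rfl⟩ := List.length_eq_one_iff.1 (hsing (i, a) (by simp))
    obtain ⟨y, rfl⟩ := List.length_eq_one_iff.1 (hsing (j, b) (by simp))
    have hij : i < j := (List.pairwise_cons.1 hpw).1 (j, [y]) (by simp)
    simp only [pvGroups, pvGaux, pvAclass, pvBclass, PySem.Dict.size, PySem.Dict.keys,
      PySem.Dict.getD_eq_get?_getD, PySem.Dict.get?_mk_cons, PySem.List.pyGetD_ofNat']
    by_cases ha1 : i + 1 = j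
    · simp [ha1, hij.ne, hij.ne', List.getD]
    · have ha1' : j ≠ i + 1 := fun hh => ha1 hh.symm
      simp [ha1, ha1', hij.ne, hij.ne', List.getD]
  rcases P with _ | ⟨⟨m, d2⟩, P⟩
  · -- three digits
    obtain ⟨x, rfl⟩ := List.length_eq_one_iff.1 (hsing (i, a) (by simp))
    obtain ⟨y, rfl⟩ := List.length_eq_one_iff.1 (hsing (j, b) (by simp))
    obtain ⟨z, rfl⟩ := List.length_eq_one_iff.1 (hsing (k, c2) (by simp))
    have h1 := List.pairwise_cons.1 hpw
    have h2 := List.pairwise_cons.1 h1.2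
    have hij : i < j := h1.1 (j, [y]) (by simp)
    have hik : i < k := h1.1 (k, [z]) (by simp)
    have hjk : j < k := h2.1 (k, [z]) (by simp)
    simp only [pvGroups, pvGaux, pvAclass, pvBclass, PySem.Dict.size, PySem.Dict.keys,
      PySem.Dict.getD_eq_get?_getD, PySem.Dict.get?_mk_cons, PySem.List.pyGetD_ofNat']
    by_cases ha1 : i + 1 = j <;> by_cases ha2 : j + 1 = k
    · simp [ha1, ha2, hij.ne, hik.ne, hjk.ne, List.getD]
    · have ha2' : k ≠ j + 1 := fun hh => ha2 hh.symm
      simp [ha1, ha2, ha2', hij.ne, hik.ne, hjk.ne, List.getD]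
    · have ha1' : j ≠ i + 1 := fun hh => ha1 hh.symm
      simp [ha1, ha1', ha2, hij.ne, hik.ne, hjk.ne, List.getD]
    · have ha1' : j ≠ i + 1 := fun hh => ha1 hh.symm
      have ha2' : k ≠ j + 1 := fun hh => ha2 hh.symm
      simp [ha1, ha1', ha2, ha2', hij.ne, hik.ne, hjk.ne, List.getD]
  rcases P with _ | ⟨⟨q, e2⟩, P⟩
  · -- four digits
    obtain ⟨x, rfl⟩ := List.length_eq_one_iff.1 (hsing (i, a) (by simp))
    obtain ⟨y, rfl⟩ := List.length_eq_one_iff.1 (hsing (j, b) (by simp))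
    obtain ⟨z, rfl⟩ := List.length_eq_one_iff.1 (hsing (k, c2) (by simp))
    obtain ⟨w, rfl⟩ := List.length_eq_one_iff.1 (hsing (m, d2) (by simp))
    have h1 := List.pairwise_cons.1 hpw
    have h2 := List.pairwise_cons.1 h1.2
    have h3 := List.pairwise_cons.1 h2.2
    have hij : i < j := h1.1 (j, [y]) (by simp)
    have hik : i < k := h1.1 (k, [z]) (by simp)
    have him : i < m := h1.1 (m, [w]) (by simp)
    have hjk : j < k := h2.1 (k, [z]) (by simp)
    have hjm : j < m := h2.1 (m, [w]) (by simp)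
    have hkm : k < m := h3.1 (m, [w]) (by simp)
    simp only [pvGroups, pvGaux, pvAclass, pvBclass, PySem.Dict.size, PySem.Dict.keys,
      PySem.Dict.getD_eq_get?_getD, PySem.Dict.get?_mk_cons, PySem.List.pyGetD_ofNat']
    by_cases ha1 : i + 1 = j <;> by_cases ha2 : j + 1 = k <;> by_cases ha3 : k + 1 = m
    · simp [ha1, ha2, ha3, hij.ne, hik.ne, him.ne, hjk.ne, hjm.ne, hkm.ne, List.getD]
    · have ha3' : m ≠ k + 1 := fun hh => ha3 hh.symm
      simp [ha1, ha2, ha3, ha3', hij.ne, hik.ne, him.ne, hjk.ne, hjm.ne, hkm.ne, List.getD]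
    · have ha2' : k ≠ j + 1 := fun hh => ha2 hh.symm
      simp [ha1, ha2, ha2', ha3, hij.ne, hik.ne, him.ne, hjk.ne, hjm.ne, hkm.ne, List.getD]
    · have ha2' : k ≠ j + 1 := fun hh => ha2 hh.symm
      have ha3' : m ≠ k + 1 := fun hh => ha3 hh.symm
      simp [ha1, ha2, ha2', ha3, ha3', hij.ne, hik.ne, him.ne, hjk.ne, hjm.ne, hkm.ne, List.getD]
    · have ha1' : j ≠ i + 1 := fun hh => ha1 hh.symm
      simp [ha1, ha1', ha2, ha3, hij.ne, hik.ne, him.ne, hjk.ne, hjm.ne, hkm.ne, List.getD]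
    · have ha1' : j ≠ i + 1 := fun hh => ha1 hh.symm
      have ha3' : m ≠ k + 1 := fun hh => ha3 hh.symm
      simp [ha1, ha1', ha2, ha3, ha3', hij.ne, hik.ne, him.ne, hjk.ne, hjm.ne, hkm.ne, List.getD]
    · have ha1' : j ≠ i + 1 := fun hh => ha1 hh.symm
      have ha2' : k ≠ j + 1 := fun hh => ha2 hh.symm
      simp [ha1, ha1', ha2, ha2', ha3, hij.ne, hik.ne, him.ne, hjk.ne, hjm.ne, hkm.ne, List.getD]
    · have ha1' : j ≠ i + 1 := fun hh => ha1 hh.symm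
      have ha2' : k ≠ j + 1 := fun hh => ha2 hh.symm
      have ha3' : m ≠ k + 1 := fun hh => ha3 hh.symm
      simp [ha1, ha1', ha2, ha2', ha3, ha3', hij.ne, hik.ne, him.ne, hjk.ne, hjm.ne, hkm.ne, List.getD]
  · -- five or more digits
    have hA : pvAclass data (PySem.Dict.mk ((i, a) :: (j, b) :: (k, c2) :: (m, d2) :: (q, e2) :: P)) = (0, data) := by
      unfold pvAclass
      rw [if_pos]
      left
      simp [PySem.Dict.size]
    have hlen := pvGroups_len ((i, a) :: (j, b) :: (k, c2) :: (m, d2) :: (q, e2) :: P) hsing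
    rw [hA]
    rcases hG : pvGroups ((i, a) :: (j, b) :: (k, c2) :: (m, d2) :: (q, e2) :: P)
      with _ | ⟨r, _ | ⟨r2, rest2⟩⟩
    · rfl
    · rw [hG] at hlen
      simp at hlen
      have hc1 : ¬ (r.length = 1 ∨ r.length = 2) := by omega
      have hc2 : ¬ r.length = 4 := by omega
      simp [pvBclass, hc1, hc2]
    · rw [hG] at hlen
      simp at hlen
      rcases rest2 with _ | ⟨r3, rest3⟩
      · simp at hlen
        have hc : ¬ (r.length ≤ r2.length ∧ r2.length ≤ 2) := by omega
        simp [pvBclass, hc]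
      · simp [pvBclass]

-- ===== VERDICT (by name: the statement is the Claim_ definition above) =====
theorem check_count_players_spec : Claim_equal_check_count_players := by
  intro data _
  unfold Spec_check_count_players
  rw [pvA_eq, pvB_eq]
  exact pvMain data (pvPos 0 data.toList) (pvPos_pairwise 0 data.toList)
    (pvPos_sing 0 data.toList)
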